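-- pv_equiv track=rewrite | github.com/dadstablet/CS50-Intro-to-Python | plates/plates.py | num_between
-- ===== SOURCE A (Python) =====
-- def num_between(x):
--     num_string = False
--     for char in x:
--         if char.isdigit():
--             num_string = True
--         elif char.isalpha():
--             if num_string == True:
--                 return False
--     else:
--         return True
-- ===== SOURCE B (Python) =====
-- def num_between(x):
--     i = None
--     for j, c in enumerate(x):
--         if c.isdigit():
--             i = j
--             break
--     if i is None:
--         return True
--     return not any(c.isalpha() for c in x[i+1:])
-- ===== Notes on version B (the rewrite author's own statement) =====
-- stated objective: alternative
-- what changed: Replaced the sticky-flag single pass with a two-phase shape: find the index of the first digit (early break), then test the suffix after it for any letter.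
import Mathlib
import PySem

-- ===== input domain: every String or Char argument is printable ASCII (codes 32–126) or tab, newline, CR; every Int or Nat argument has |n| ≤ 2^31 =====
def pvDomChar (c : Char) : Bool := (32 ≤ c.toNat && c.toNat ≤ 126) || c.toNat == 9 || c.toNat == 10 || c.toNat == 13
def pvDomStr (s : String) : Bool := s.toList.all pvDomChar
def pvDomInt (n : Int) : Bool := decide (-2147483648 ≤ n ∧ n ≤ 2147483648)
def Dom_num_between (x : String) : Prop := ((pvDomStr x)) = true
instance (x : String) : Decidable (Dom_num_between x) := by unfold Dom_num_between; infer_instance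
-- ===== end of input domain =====

-- B replaces A's sticky-flag single pass by a two-phase shape: find the first digit, then
-- check the suffix after it for a letter (objective: alternative decomposition, same cost).

-- ===== PORT A =====
-- sticky-flag loop of A: num_string starts False, set on a digit, a letter with flag set returns False
def numBetweenLoop : List Char → Bool → Bool
  | [], _ => true
  | c :: cs, flag =>
    if PySem.Chars.isdigit c then numBetweenLoop cs true
    else if PySem.Chars.isalpha c then
      (if flag then false else numBetweenLoop cs flag)
    else numBetweenLoop cs flag

def num_between (x : String) : Bool := numBetweenLoop x.toList false

-- ===== PORT B =====
-- first phase of B: index of the first digit (the enumerate loop with break), none if no digit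
def firstDigitIdx : List Char → Nat → Option Nat
  | [], _ => none
  | c :: cs, j => if PySem.Chars.isdigit c then some j else firstDigitIdx cs (j + 1)

def num_between_alt (x : String) : Bool :=
  match firstDigitIdx x.toList 0 with
  | none => true
  | some i => !((PySem.List.slice x.toList (some ((i : Int) + 1)) none).any PySem.Chars.isalpha)

-- ===== PRECONDITION & SPEC =====
def Spec_num_between (x : String) (out : Bool) : Prop := out = num_between_alt x
instance (x : String) (out : Bool) : Decidable (Spec_num_between x out) := by unfold Spec_num_between; infer_instance

-- ===== CLAIM (what is proved, stated in full; the proofs are below) =====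
def Claim_equal_num_between : Prop := ∀ (x : String), Dom_num_between x → Spec_num_between x (num_between x)

-- ===== LEMMAS AND PROOFS =====

theorem firstDigitIdx_shift (cs : List Char) (j : Nat) :
    firstDigitIdx cs j = (firstDigitIdx cs 0).map (· + j) := by
  induction cs generalizing j with
  | nil => simp [firstDigitIdx]
  | cons c cs ih =>
    simp only [firstDigitIdx]
    split
    · simp
    · rw [ih (j + 1), ih 1]
      cases firstDigitIdx cs 0 <;> simp <;> omega

theorem isdigit_not_isalpha (c : Char) (h : PySem.Chars.isdigit c = true) :
    PySem.Chars.isalpha c = false := by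
  revert h
  simp only [PySem.Chars.isdigit, PySem.Chars.isalpha, PySem.Chars.isupper, PySem.Chars.islower]
  have h48 : ('0' : Char).val.toNat = 48 := rfl
  have h57 : ('9' : Char).val.toNat = 57 := rfl
  have h65 : ('A' : Char).val.toNat = 65 := rfl
  have h90 : ('Z' : Char).val.toNat = 90 := rfl
  have h97 : ('a' : Char).val.toNat = 97 := rfl
  have h122 : ('z' : Char).val.toNat = 122 := rfl
  simp only [Char.le_def, UInt32.le_iff_toNat_le, h48, h57, h65, h90, h97, h122,
    Bool.and_eq_true, decide_eq_true_eq, Bool.or_eq_false_iff, Bool.and_eq_false_iff,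
    decide_eq_false_iff_not, not_le]
  omega

theorem numBetweenLoop_true (cs : List Char) :
    numBetweenLoop cs true = !(cs.any PySem.Chars.isalpha) := by
  induction cs with
  | nil => simp [numBetweenLoop]
  | cons c cs ih =>
    simp only [numBetweenLoop, List.any_cons]
    by_cases hd : PySem.Chars.isdigit c
    · simp [hd, isdigit_not_isalpha c hd, ih]
    · by_cases ha : PySem.Chars.isalpha c
      · simp [hd, ha]
      · simp [hd, ha, ih]

theorem numBetweenLoop_false (cs : List Char) :
    numBetweenLoop cs false =
      (match firstDigitIdx cs 0 with
       | none => true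
       | some i => !((cs.drop (i + 1)).any PySem.Chars.isalpha)) := by
  induction cs with
  | nil => simp [numBetweenLoop, firstDigitIdx]
  | cons c cs ih =>
    simp only [numBetweenLoop, firstDigitIdx]
    by_cases hd : PySem.Chars.isdigit c
    · simp [hd, numBetweenLoop_true cs]
    · rw [ih, show (0 + 1 : Nat) = 1 from rfl, firstDigitIdx_shift cs 1]
      cases h : firstDigitIdx cs 0 <;> simp [hd, List.drop_succ_cons]

-- ===== VERDICT (by name: the statement is the Claim_ definition above) =====
theorem num_between_spec : Claim_equal_num_between := by
  intro x _
  unfold Spec_num_between num_between num_between_alt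
  rw [numBetweenLoop_false]
  cases h : firstDigitIdx x.toList 0 with
  | none => simp
  | some i =>
    simp only [h]
    rw [show ((i : Int) + 1) = ((i + 1 : Nat) : Int) by push_cast; ring,
        PySem.List.slice_from_natCast]
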